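-- pv_equiv track=rewrite | github.com/kodareef5/sha256-probe | headline_hunt/bets/block2_wang/encoders/pair_beam_search.py | parse_regs
-- ===== SOURCE A (Python) =====
-- REG_INDEX = {"a": 0, "b": 1, "c": 2, "d": 3, "e": 4, "f": 5, "g": 6, "h": 7}
--
-- def parse_regs(raw: str) -> tuple[int, ...]:
--     if not raw:
--         return ()
--     out = []
--     for part in raw.split(","):
--         reg = part.strip().lower()
--         if not reg:
--             continue
--         if reg not in REG_INDEX:
--             raise ValueError(f"unknown register: {reg}")
--         out.append(REG_INDEX[reg])
--     return tuple(dict.fromkeys(out))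
-- ===== SOURCE B (Python) =====
-- WS = " \t\n\r\v\f"
--
-- def parse_regs(raw: str) -> tuple[int, ...]:
--     # char-level state machine: no split/strip/dict; index by arithmetic, dedup by bitmask
--     out = []
--     mask = 0
--     count = 0   # non-whitespace chars seen in the current token
--     idx = -1    # register index of the last non-whitespace char (-1 if not a register)
--     for ch in raw + ",":
--         if ch == ",":
--             if count == 1 and idx >= 0:
--                 if not (mask >> idx) & 1:
--                     mask |= 1 << idx
--                     out.append(idx)
--             elif count != 0:
--                 raise ValueError("unknown register")
--             count = 0
--             idx = -1
--         elif ch not in WS: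
--             count += 1
--             c = ch.lower()
--             idx = ord(c) - 97 if "a" <= c <= "h" else -1
--     return tuple(out)
-- ===== Notes on version B (the rewrite author's own statement) =====
-- stated objective: alternative
-- what changed: B replaces A's split-into-tokens / strip / lower / dict-lookup / dict.fromkeys-dedup pipeline by a single character-level state machine over raw+',' that never builds token substrings: it counts non-whitespace chars per token, computes the register index arithmetically from the character code, and deduplicates with an integer bitmask.
import Mathlib
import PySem

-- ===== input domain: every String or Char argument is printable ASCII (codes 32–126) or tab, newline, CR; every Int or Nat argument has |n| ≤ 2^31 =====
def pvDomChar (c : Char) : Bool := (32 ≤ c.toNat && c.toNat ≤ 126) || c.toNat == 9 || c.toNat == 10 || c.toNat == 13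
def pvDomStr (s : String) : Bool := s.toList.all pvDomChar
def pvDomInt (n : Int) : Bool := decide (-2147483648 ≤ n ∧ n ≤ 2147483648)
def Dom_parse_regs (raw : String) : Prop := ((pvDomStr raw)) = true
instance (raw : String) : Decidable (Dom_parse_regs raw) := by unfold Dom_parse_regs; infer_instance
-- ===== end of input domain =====

-- B replaces A's split/strip/lower/dict pipeline by a single character-level state machine
-- (arithmetic register index, bitmask dedup); objective: alternative decomposition, same cost.


-- REG_INDEX, the module-level constant A uses
def pvRegIndex : PySem.Dict (List Char) Int :=
  PySem.Dict.ofList [(['a'], 0), (['b'], 1), (['c'], 2), (['d'], 3), (['e'], 4), (['f'], 5), (['g'], 6), (['h'], 7)]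

-- ===== PORT A =====
-- loop body of A's 'for part in raw.split(",")'; state = none once ValueError was raised
def parse_regs_loop (acc : Option (List Int)) (part : List Char) : Option (List Int) :=
  match acc with
  | none => none
  | some out =>
    let reg := PySem.Chars.lower (PySem.Chars.strip part)
    if reg = [] then some out
    else
      match PySem.Dict.get? pvRegIndex reg with
      | none => none                       -- raise ValueError (excluded by Pre_)
      | some i => some (out ++ [i])

def parse_regs (raw : String) : List Int :=
  if raw = "" then []
  else
    match (PySem.Chars.splitOn raw.toList [',']).foldl parse_regs_loop (some []) with
    | none => []                           -- unreachable under Pre_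
    | some out => PySem.List.dedup out     -- tuple(dict.fromkeys(out))

-- ===== PORT B =====
-- B's module constant WS = " \t\n\r\v\f"
def pvWS : List Char := [' ', '\t', '\n', '\r', '\x0B', '\x0C']

-- B's inline 'ord(c) - 97 if "a" <= c <= "h" else -1'
def pvIdx (c : Char) : Int := if 'a' ≤ c ∧ c ≤ 'h' then (c.toNat : Int) - 97 else -1

-- loop body of B's per-character loop (input plus a trailing comma sentinel); state = (out, mask, count, idx), none once ValueError was
-- raised.  mask is Python's nonnegative int bitmask (a Nat here); idx.toNat is taken only under the
-- guard 0 ≤ idx, where it is exact.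
def parse_regs_alt_step (st : Option (List Int × Nat × Nat × Int)) (ch : Char) :
    Option (List Int × Nat × Nat × Int) :=
  match st with
  | none => none
  | some (out, mask, count, idx) =>
    if ch = ',' then
      if count = 1 ∧ 0 ≤ idx then
        if (mask >>> idx.toNat) &&& 1 = 0 then       -- 'if not (mask >> idx) & 1'
          some (out ++ [idx], mask ||| (1 <<< idx.toNat), 0, -1)
        else some (out, mask, 0, -1)
      else if count ≠ 0 then none                    -- raise ValueError (excluded by Pre_)
      else some (out, mask, 0, -1)
    else if pvWS.contains ch then st                 -- whitespace: nothing changes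
    else some (out, mask, count + 1, pvIdx (PySem.Chars.lowerChar ch))

def parse_regs_alt (raw : String) : List Int :=
  match (raw.toList ++ [',']).foldl parse_regs_alt_step (some ([], 0, 0, -1)) with
  | none => []                             -- unreachable under Pre_
  | some (out, _, _, _) => out

-- ===== PRECONDITION & SPEC =====
-- Pre_ excludes exactly the inputs with a token that is not a register name, on which both Pythons raise ValueError.
def Pre_parse_regs (raw : String) : Prop :=
  ∀ part ∈ PySem.Chars.splitOn raw.toList [','],
    PySem.Chars.lower (PySem.Chars.strip part) = [] ∨
    PySem.Chars.lower (PySem.Chars.strip part) ∈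
      [['a'], ['b'], ['c'], ['d'], ['e'], ['f'], ['g'], ['h']]
instance (raw : String) : Decidable (Pre_parse_regs raw) := by unfold Pre_parse_regs; infer_instance

def pvWitness_parse_regs : String := " c,a ,C,,b"

def Spec_parse_regs (raw : String) (out : List Int) : Prop := out = parse_regs_alt raw
instance (raw : String) (out : List Int) : Decidable (Spec_parse_regs raw out) := by unfold Spec_parse_regs; infer_instance

-- ===== CLAIM (what is proved, stated in full; the proofs are below) =====
def Claim_equal_parse_regs : Prop := ∀ (raw : String), Dom_parse_regs raw → Pre_parse_regs raw → Spec_parse_regs raw (parse_regs raw)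

-- ===== LEMMAS AND PROOFS =====

-- tiny Char facts
lemma char_toNat_inj {c d : Char} : c.toNat = d.toNat ↔ c = d :=
  ⟨fun h => Char.ext (UInt32.toNat_inj.mp h), fun h => h ▸ rfl⟩

lemma char_le_iff {c d : Char} : c ≤ d ↔ c.toNat ≤ d.toNat := by
  rw [Char.le_def, UInt32.le_iff_toNat_le]; rfl

-- PySem.Chars.splitOn with separator "," is List.splitOnP (· == ',')
lemma splitOn_go_comma (fuel : Nat) : ∀ (l cur : List Char) (acc : List (List Char)),
    l.length < fuel →
    PySem.Chars.splitOn.go [','] fuel l cur acc =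
      acc.reverse ++ (List.splitOnP (fun c => c == ',') l).modifyHead (cur.reverse ++ ·) := by
  induction fuel with
  | zero => intro l cur acc h; omega
  | succ fuel ih =>
    intro l cur acc h
    match l with
    | [] =>
      rw [PySem.Chars.splitOn.go]
      · simp [List.splitOnP_nil]
      · omega
    | c :: rest =>
      rw [PySem.Chars.splitOn.go]
      by_cases hc : c = ','
      · subst hc
        have hp : [','].isPrefixOf (',' :: rest) = true := by simp [List.isPrefixOf]
        rw [if_pos hp]
        simp only [List.length_singleton, List.drop_succ_cons, List.drop_zero]
        rw [ih rest [] _ (by simpa using h)]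
        rcases hsp : List.splitOnP (fun c => c == ',') rest with _ | ⟨hd, tl⟩
        · exact absurd hsp (List.splitOnP_ne_nil _ _)
        · simp [List.splitOnP_cons, hsp]
      · have hp : [','].isPrefixOf (c :: rest) = false := by
          simp [List.isPrefixOf]; exact fun h' => hc h'.symm
        rw [if_neg (by simp [hp])]
        rw [ih rest (c :: cur) acc (by simpa using h)]
        have hb : (c == ',') = false := by simpa using hc
        rcases hsp : List.splitOnP (fun c => c == ',') rest with _ | ⟨hd, tl⟩
        · exact absurd hsp (List.splitOnP_ne_nil _ _)
        · simp [List.splitOnP_cons, hsp, hb]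

lemma splitOn_comma (cs : List Char) :
    PySem.Chars.splitOn cs [','] = List.splitOnP (fun c => c == ',') cs := by
  rw [PySem.Chars.splitOn, splitOn_go_comma (cs.length + 1) cs [] [] (by omega)]
  rcases hsp : List.splitOnP (fun c => c == ',') cs with _ | ⟨hd, tl⟩
  · exact absurd hsp (List.splitOnP_ne_nil _ _)
  · simp

-- none propagates through both loops
lemma parse_regs_loop_none (ts : List (List Char)) :
    ts.foldl parse_regs_loop none = none := by
  induction ts with
  | nil => rfl
  | cons t ts ih => simpa [parse_regs_loop] using ih

lemma parse_regs_alt_step_none (cs : List Char) :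
    cs.foldl parse_regs_alt_step none = none := by
  induction cs with
  | nil => rfl
  | cons c cs ih => simpa [parse_regs_alt_step] using ih

-- B's scan of a comma-free token: count counts non-whitespace chars, idx follows the last one
lemma scan_token (t : List Char) (h : ∀ c ∈ t, c ≠ ',') (out : List Int) (mask : Nat) :
    ∀ (k : Nat) (i0 : Int),
    t.foldl parse_regs_alt_step (some (out, mask, k, i0)) =
      some (out, mask, k + (t.filter (fun c => !pvWS.contains c)).length,
        ((t.filter (fun c => !pvWS.contains c)).map (fun c => pvIdx (PySem.Chars.lowerChar c))).getLastD i0) := by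
  induction t with
  | nil => intro k i0; simp
  | cons c t ih =>
    intro k i0
    have hc : c ≠ ',' := h c (by simp)
    have ht : ∀ x ∈ t, x ≠ ',' := fun x hx => h x (by simp [hx])
    by_cases hw : pvWS.contains c
    · rw [List.foldl_cons, show parse_regs_alt_step (some (out, mask, k, i0)) c
          = some (out, mask, k, i0) from by
            simp [parse_regs_alt_step, hc, show (c ∈ pvWS) from by simpa using hw]]
      rw [ih ht k i0, List.filter_cons_of_neg (by simpa using hw)]
    · rw [List.foldl_cons, show parse_regs_alt_step (some (out, mask, k, i0)) c
          = some (out, mask, k + 1, pvIdx (PySem.Chars.lowerChar c)) from by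
            simp [parse_regs_alt_step, hc, show ¬ (c ∈ pvWS) from by simpa using hw]]
      rw [ih ht, List.filter_cons_of_pos (by simpa using hw), List.map_cons, List.getLastD_cons,
        List.length_cons]
      simp only [Option.some.injEq, Prod.mk.injEq]
      refine ⟨trivial, trivial, by omega, trivial⟩

-- on the domain, Python whitespace is exactly B's WS
lemma dom_isspace (c : Char) (h : pvDomChar c = true) :
    PySem.Chars.isspace c = pvWS.contains c := by
  rw [Bool.eq_iff_iff]
  simp only [PySem.Chars.isspace, pvWS, pvDomChar, List.contains_eq_mem, decide_eq_true_eq,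
    List.mem_cons, List.not_mem_nil, or_false, Bool.or_eq_true, Bool.and_eq_true,
    beq_iff_eq, ← char_toNat_inj] at *
  have e1 : (' ').toNat = 32 := rfl
  have e2 : ('\t').toNat = 9 := rfl
  have e3 : ('\n').toNat = 10 := rfl
  have e4 : ('\r').toNat = 13 := rfl
  have e5 : ('\x0B').toNat = 11 := rfl
  have e6 : ('\x0C').toNat = 12 := rfl
  omega

-- strip facts, phrased through the non-whitespace filter
lemma filter_dropWhile (p : Char → Bool) (l : List Char) :
    (l.dropWhile p).filter (fun c => !p c) = l.filter (fun c => !p c) := by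
  induction l with
  | nil => rfl
  | cons c l ih =>
    by_cases hc : p c
    · simp [hc, ih]
    · simp [hc]

lemma filter_strip (t : List Char) :
    (PySem.Chars.strip t).filter (fun c => !PySem.Chars.isspace c) =
      t.filter (fun c => !PySem.Chars.isspace c) := by
  rw [PySem.Chars.strip, PySem.Chars.rstrip, PySem.Chars.lstrip]
  rw [List.filter_reverse, filter_dropWhile, List.filter_reverse, List.reverse_reverse,
    filter_dropWhile]

lemma strip_of_filter_nil (t : List Char) (h : t.filter (fun c => !PySem.Chars.isspace c) = []) :
    PySem.Chars.strip t = [] := by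
  rw [List.filter_eq_nil_iff] at h
  rw [PySem.Chars.strip, PySem.Chars.lstrip, List.dropWhile_eq_nil_iff.mpr (by simpa using h)]
  rfl

lemma strip_of_filter_single (t : List Char) (c : Char)
    (h : t.filter (fun c => !PySem.Chars.isspace c) = [c]) :
    PySem.Chars.strip t = [c] := by
  rw [List.filter_eq_cons_iff] at h
  obtain ⟨l₁, l₂, rfl, h1, hc, h2⟩ := h
  rw [List.filter_eq_nil_iff] at h2
  simp only [Bool.not_eq_eq_eq_not, Bool.not_true] at h1 h2 hc
  have e1 : List.dropWhile PySem.Chars.isspace l₁ = [] := by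
    rw [List.dropWhile_eq_nil_iff]; simpa using h1
  have e2 : List.dropWhile PySem.Chars.isspace l₂.reverse = [] := by
    rw [List.dropWhile_eq_nil_iff]; simp; intro x hx; simpa using h2 x hx
  rw [PySem.Chars.strip, PySem.Chars.lstrip, List.dropWhile_append, e1]
  simp only [List.isEmpty_nil, if_true]
  rw [List.dropWhile_cons_of_neg (by simp [hc])]
  rw [PySem.Chars.rstrip]
  simp only [List.reverse_cons]
  rw [List.dropWhile_append, e2]
  simp [hc]

-- REG_INDEX lookups
lemma regIndex_items :
    pvRegIndex.items = [(['a'], 0), (['b'], 1), (['c'], 2), (['d'], 3), (['e'], 4), (['f'], 5), (['g'], 6), (['h'], 7)] := by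
  decide

lemma regIndex_len (cs : List Char) (h : cs.length ≠ 1) :
    PySem.Dict.get? pvRegIndex cs = none := by
  have hb : ∀ c : Char, (([c] == cs)) = false := by
    intro c; rw [beq_eq_false_iff_ne]; intro hc; apply h; rw [← hc]; rfl
  simp [PySem.Dict.get?, regIndex_items, List.find?, hb]

lemma regIndex_single (c : Char) :
    PySem.Dict.get? pvRegIndex [c] =
      if 'a' ≤ c ∧ c ≤ 'h' then some ((c.toNat : Int) - 97) else none := by
  by_cases h : 'a' ≤ c ∧ c ≤ 'h'
  · rw [if_pos h]
    obtain ⟨h1, h2⟩ := h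
    rw [char_le_iff] at h1 h2
    have h1' : 97 ≤ c.toNat := h1
    have h2' : c.toNat ≤ 104 := h2
    interval_cases hn : c.toNat <;>
      first
      | (rw [show c = 'a' from char_toNat_inj.mp hn]; decide)
      | (rw [show c = 'b' from char_toNat_inj.mp hn]; decide)
      | (rw [show c = 'c' from char_toNat_inj.mp hn]; decide)
      | (rw [show c = 'd' from char_toNat_inj.mp hn]; decide)
      | (rw [show c = 'e' from char_toNat_inj.mp hn]; decide)
      | (rw [show c = 'f' from char_toNat_inj.mp hn]; decide)
      | (rw [show c = 'g' from char_toNat_inj.mp hn]; decide)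
      | (rw [show c = 'h' from char_toNat_inj.mp hn]; decide)
  · rw [if_neg h]
    have hnum : ¬(97 ≤ c.toNat ∧ c.toNat ≤ 104) := by
      intro hx; exact h ⟨char_le_iff.mpr hx.1, char_le_iff.mpr hx.2⟩
    have hx : ∀ d : Char, 97 ≤ d.toNat → d.toNat ≤ 104 → (([d] == [c] : Bool)) = false := by
      intro d hd1 hd2
      rw [beq_eq_false_iff_ne]
      intro he
      have : d = c := by injection he
      apply hnum; rw [← this]; exact ⟨hd1, hd2⟩
    simp [PySem.Dict.get?, regIndex_items, List.find?,
      hx 'a' (by decide) (by decide), hx 'b' (by decide) (by decide),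
      hx 'c' (by decide) (by decide), hx 'd' (by decide) (by decide),
      hx 'e' (by decide) (by decide), hx 'f' (by decide) (by decide),
      hx 'g' (by decide) (by decide), hx 'h' (by decide) (by decide)]

-- the invariant tying B's running state to A's accumulated list
def pvInv (accA out : List Int) (mask : Nat) : Prop :=
  out = PySem.List.dedup accA ∧ ∀ j : Nat, ((mask >>> j) &&& 1 = 0) ↔ (j : Int) ∉ accA

lemma bit_or_shift (mask j n : Nat) :
    (((mask ||| (1 <<< n)) >>> j) &&& 1 = 0) ↔ (((mask >>> j) &&& 1 = 0) ∧ j ≠ n) := by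
  have h : ∀ m i : Nat, ((m >>> i) &&& 1 = 0) ↔ m.testBit i = false := by
    intro m i; simp [Nat.testBit, Nat.and_one_is_mod, Nat.one_and_eq_mod_two]
  rw [h, h, Nat.testBit_or, Nat.testBit_shiftLeft]
  have h1 : (1 : Nat).testBit (j - n) = decide (j - n = 0) := by
    rcases hj : j - n with _ | m <;> simp [Nat.testBit_succ]
  rw [h1]
  cases hb : mask.testBit j <;> by_cases hjn : j = n <;> simp [hjn] <;> omega

lemma dedup_append_singleton (acc : List Int) (x : Int) :
    PySem.List.dedup (acc ++ [x]) = PySem.Set.add (PySem.List.dedup acc) x := by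
  simp [PySem.List.dedup_eq_ofList, PySem.Set.ofList_eq_foldl, List.foldl_append]

-- one complete token followed by its terminating comma
lemma token_step (t : List Char) (hc : ∀ c ∈ t, c ≠ ',') (hdom : ∀ c ∈ t, pvDomChar c = true)
    (accA out : List Int) (mask : Nat) (hinv : pvInv accA out mask) :
    match parse_regs_loop (some accA) t with
    | none => parse_regs_alt_step (t.foldl parse_regs_alt_step (some (out, mask, 0, -1))) ',' = none
    | some accA' => ∃ mask',
        parse_regs_alt_step (t.foldl parse_regs_alt_step (some (out, mask, 0, -1))) ',' =
          some (PySem.List.dedup accA', mask', 0, -1) ∧ pvInv accA' (PySem.List.dedup accA') mask' := by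
  obtain ⟨hout, hmask⟩ := hinv
  rw [scan_token t hc out mask 0 (-1)]
  have hfe : t.filter (fun c => !pvWS.contains c) = t.filter (fun c => !PySem.Chars.isspace c) :=
    List.filter_congr (fun c hcm => by rw [dom_isspace c (hdom c hcm)])
  rcases hf : t.filter (fun c => !pvWS.contains c) with _ | ⟨c, rest⟩
  · -- all-whitespace token: A skips it, B's count is 0
    have hstrip : PySem.Chars.strip t = [] := strip_of_filter_nil t (by rw [← hfe, hf])
    simp only [parse_regs_loop, hstrip, PySem.Chars.lower, List.map_nil]
    exact ⟨mask, by simp [parse_regs_alt_step, hout], rfl, hmask⟩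
  · rcases rest with _ | ⟨c2, rest2⟩
    · -- exactly one non-whitespace char c
      have hstrip : PySem.Chars.strip t = [c] := strip_of_filter_single t c (by rw [← hfe, hf])
      have hlow : PySem.Chars.lower (PySem.Chars.strip t) = [PySem.Chars.lowerChar c] := by
        rw [hstrip]; rfl
      simp only [parse_regs_loop, hlow, List.map_nil, List.length_singleton, List.map_cons,
        List.getLastD_cons, List.getLastD_nil]
      rw [if_neg (by simp)]
      rw [regIndex_single (PySem.Chars.lowerChar c)]
      set lc := PySem.Chars.lowerChar c with hlc
      by_cases hr : 'a' ≤ lc ∧ lc ≤ 'h'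
      · rw [if_pos hr]
        have h97 : 97 ≤ lc.toNat := char_le_iff.mp hr.1
        have hidx : pvIdx lc = (lc.toNat : Int) - 97 := if_pos hr
        set i : Int := (lc.toNat : Int) - 97 with hi
        have hi0 : 0 ≤ i := by omega
        have hiN : (i.toNat : Int) = i := Int.toNat_of_nonneg hi0
        simp only [hidx]
        rw [show parse_regs_alt_step (some (out, mask, 0 + 1, i)) ','
            = if (mask >>> i.toNat) &&& 1 = 0 then
                some (out ++ [i], mask ||| (1 <<< i.toNat), 0, -1)
              else some (out, mask, 0, -1) from by
          simp [parse_regs_alt_step, hi0]]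
        by_cases hbit : (mask >>> i.toNat) &&& 1 = 0
        · have hnotin : i ∉ accA := by
            have := (hmask i.toNat).mp hbit; rwa [hiN] at this
          rw [if_pos hbit]
          refine ⟨mask ||| (1 <<< i.toNat), ?_, rfl, ?_⟩
          · have : PySem.List.dedup (accA ++ [i]) = PySem.List.dedup accA ++ [i] := by
              rw [dedup_append_singleton, PySem.Set.add,
                if_neg (by simp; exact hnotin)]
            rw [this, hout]
          · intro j
            rw [bit_or_shift, hmask j]
            constructor
            · rintro ⟨hj1, hj2⟩
              simp only [List.mem_append, List.mem_singleton]
              rintro (hja | hje)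
              · exact hj1 hja
              · apply hj2; omega
            · intro hj
              simp only [List.mem_append, List.mem_singleton] at hj
              push_neg at hj
              exact ⟨hj.1, by intro he; apply hj.2; omega⟩
        · have hin : i ∈ accA := by
            by_contra hni
            exact hbit ((hmask i.toNat).mpr (by rwa [hiN]))
          rw [if_neg hbit]
          refine ⟨mask, ?_, rfl, ?_⟩
          · have : PySem.List.dedup (accA ++ [i]) = PySem.List.dedup accA := by
              rw [dedup_append_singleton, PySem.Set.add,
                if_pos (by simp; exact hin)]
            rw [this, hout]
          · intro j
            rw [hmask j]
            simp only [List.mem_append, List.mem_singleton]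
            constructor
            · intro hj; rintro (hja | hje)
              · exact hj hja
              · exact hj (hje ▸ hin)
            · intro hj hja; exact hj (Or.inl hja)
      · rw [if_neg hr]
        have hidx : pvIdx lc = -1 := if_neg hr
        simp [parse_regs_alt_step, hidx]
    · -- two or more non-whitespace chars: not a register name, both sides fail
      have hlen2 : 2 ≤ (t.filter (fun c => !PySem.Chars.isspace c)).length := by
        rw [← hfe, hf]; simp
      have hslen : 2 ≤ (PySem.Chars.strip t).length := by
        calc 2 ≤ (t.filter (fun c => !PySem.Chars.isspace c)).length := hlen2
        _ = ((PySem.Chars.strip t).filter (fun c => !PySem.Chars.isspace c)).length := by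
            rw [filter_strip]
        _ ≤ (PySem.Chars.strip t).length := List.length_filter_le _ _
      have hne : PySem.Chars.lower (PySem.Chars.strip t) ≠ [] := by
        intro he
        rw [PySem.Chars.lower, List.map_eq_nil_iff] at he
        rw [he] at hslen
        simp at hslen
      have hget : PySem.Dict.get? pvRegIndex (PySem.Chars.lower (PySem.Chars.strip t)) = none := by
        apply regIndex_len
        simp [PySem.Chars.lower]
        omega
      simp only [parse_regs_loop, if_neg hne, hget]
      simp [parse_regs_alt_step]

-- the main correspondence, by strong induction on the remaining input
lemma main_loop (n : Nat) : ∀ (cs : List Char), cs.length = n →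
    (∀ c ∈ cs, pvDomChar c = true) → ∀ (accA out : List Int) (mask : Nat), pvInv accA out mask →
    match (List.splitOnP (fun c => c == ',') cs).foldl parse_regs_loop (some accA) with
    | none => (cs ++ [',']).foldl parse_regs_alt_step (some (out, mask, 0, -1)) = none
    | some res => ∃ mask',
        (cs ++ [',']).foldl parse_regs_alt_step (some (out, mask, 0, -1)) =
          some (PySem.List.dedup res, mask', 0, -1) := by
  induction n using Nat.strong_induction_on with
  | _ n ih =>
    intro cs hlen hdom accA out mask hinv
    have hsplit : cs.takeWhile (fun c => c != ',') ++ cs.dropWhile (fun c => c != ',') = cs :=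
      List.takeWhile_append_dropWhile
    set t := cs.takeWhile (fun c => c != ',') with hT
    have htc : ∀ c ∈ t, c ≠ ',' := by
      intro c hc; have := List.mem_takeWhile_imp hc; simpa using this
    have htp : ∀ c ∈ t, (fun c => c == ',') c ≠ true := by
      intro c hc; simpa using htc c hc
    have hdt : ∀ c ∈ t, pvDomChar c = true := by
      intro c hc; exact hdom c (by rw [← hsplit]; exact List.mem_append_left _ hc)
    rcases hr : cs.dropWhile (fun c => c != ',') with _ | ⟨c0, r'⟩
    · -- last token
      have hcs : cs = t := by rw [← hsplit, hr, List.append_nil]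
      rw [hcs, List.splitOnP_eq_single _ _ htp, List.foldl_cons, List.foldl_nil,
        List.foldl_append, List.foldl_cons, List.foldl_nil]
      have htk := token_step t htc hdt accA out mask hinv
      rcases hA : parse_regs_loop (some accA) t with _ | accA' <;> rw [hA] at htk
      · exact htk
      · obtain ⟨mask', he, _⟩ := htk
        exact ⟨mask', he⟩
    · -- a token, a comma, and the rest
      have hc0 : c0 = ',' := by
        have h1 := List.head_dropWhile_not (fun c => c != ',') (l := cs) (by rw [hr]; simp)
        simp only [hr, List.head_cons] at h1
        simpa using h1
      subst hc0
      have hcs : cs = t ++ ',' :: r' := by rw [← hsplit, hr]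
      have hdr : ∀ c ∈ r', pvDomChar c = true := by
        intro c hc; exact hdom c (by rw [hcs]; simp [hc])
      have hlt : r'.length < n := by
        have := congrArg List.length hcs
        simp at this; omega
      rw [hcs, List.splitOnP_first _ _ htp ',' (by simp) r', List.foldl_cons]
      have hB : (t ++ ',' :: r') ++ [','] = t ++ (',' :: (r' ++ [','])) := by simp
      rw [hB, List.foldl_append, List.foldl_cons]
      have htk := token_step t htc hdt accA out mask hinv
      rcases hA : parse_regs_loop (some accA) t with _ | accA' <;> rw [hA] at htk
      · rw [htk]
        simp only [parse_regs_loop_none]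
        exact parse_regs_alt_step_none _
      · obtain ⟨mask', he, hinv'⟩ := htk
        rw [he]
        exact ih r'.length hlt r' rfl hdr accA' (PySem.List.dedup accA') mask' hinv'

lemma ports_eq (raw : String) (hdom : Dom_parse_regs raw) : parse_regs raw = parse_regs_alt raw := by
  have hdl : ∀ c ∈ raw.toList, pvDomChar c = true := by
    rw [Dom_parse_regs, pvDomStr, List.all_eq_true] at hdom
    simpa using hdom
  by_cases h0 : raw = ""
  · subst h0; decide
  · rw [parse_regs, if_neg h0, splitOn_comma]
    have hinv0 : pvInv [] [] 0 := ⟨rfl, by intro j; simp⟩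
    have := main_loop raw.toList.length raw.toList rfl hdl [] [] 0 hinv0
    rw [parse_regs_alt]
    rcases hA : (List.splitOnP (fun c => c == ',') raw.toList).foldl parse_regs_loop
        (some ([] : List Int)) with _ | res <;> rw [hA] at this
    · rw [this]
    · obtain ⟨mask', he⟩ := this
      rw [he]

-- ===== VERDICT (by name: the statement is the Claim_ definition above) =====
theorem parse_regs_spec : Claim_equal_parse_regs := by
  intro raw hdom _
  unfold Spec_parse_regs
  exact ports_eq raw hdom
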